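-- pv_equiv track=rewrite | github.com/mvajhi/Design_of_algorithm | Greedy/3.py | can_beautify
-- ===== SOURCE A (Python) =====
-- start_point = 0
--
-- start = 0
--
-- def is_beautiful(heights, k):
--     n = len(heights)
--     for i in range(start, n - 1):
--         valid = False
--         for j in range(i + 1, min(i + k + 1, n)):
--             if heights[j] < heights[i]:
--                 valid = True
--                 break
--         if not valid:
--             start_point = max(0, i - 1)
--             return False
--     return True
--
-- def can_beautify(n, k, heights):
--     # Check if the initial arrangement is already beautiful
--     if is_beautiful(heights, k):
--         return "YES"
--
--     start = start_point
--     # Try swapping all pairs of books, excluding the last book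
--     for i in range(start, n - 1):
--         for j in range(i + 1, n):  # Exclude the last book (index n-1)
--             if heights[i] > heights[j]:
--                 heights[i], heights[j] = heights[j], heights[i]
--                 if is_beautiful(heights, k):
--                     return "YES"
--                 # Swap back
--                 heights[i], heights[j] = heights[j], heights[i]
--
--     return "NO"
-- ===== SOURCE B (Python) =====
-- def can_beautify(n, k, heights):
--     h = heights
--     m = len(h)
--     kk = k if k > 0 else 0
--
--     def good(p, val):
--         hp = val(p)
--         return any(val(q) < hp for q in range(p + 1, min(p + 1 + kk, m)))
--
--     # positions that currently violate the window condition, computed once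
--     bad = [p for p in range(m - 1) if not good(p, lambda x: h[x])]
--     if not bad:
--         return "YES"
--     for i in range(n - 1):
--         for j in range(i + 1, n):
--             if h[j] < h[i]:
--                 # virtual swapped view; no copy, no full rescan
--                 val = (lambda a, b: lambda x: h[b] if x == a else h[a] if x == b else h[x])(i, j)
--                 # a swap at (i, j) can only change validity at these positions
--                 changed = list(range(max(0, i - kk), i + 1)) + list(range(max(0, j - kk), j + 1))
--                 if all(b in changed for b in bad) and all(good(p, val) for p in changed if p < m - 1):
--                     return "YES"
--     return "NO"
-- ===== Notes on version B (the rewrite author's own statement) =====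
-- stated objective: alternative
-- what changed: B precomputes the list of violating positions once, and evaluates each candidate swap incrementally -- the bad set must be covered by the at most 2(k+1) positions a swap at (i,j) can affect, and only those positions are rechecked through a virtual swapped view -- instead of A's full re-scan of the array after every trial swap.
import Mathlib
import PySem

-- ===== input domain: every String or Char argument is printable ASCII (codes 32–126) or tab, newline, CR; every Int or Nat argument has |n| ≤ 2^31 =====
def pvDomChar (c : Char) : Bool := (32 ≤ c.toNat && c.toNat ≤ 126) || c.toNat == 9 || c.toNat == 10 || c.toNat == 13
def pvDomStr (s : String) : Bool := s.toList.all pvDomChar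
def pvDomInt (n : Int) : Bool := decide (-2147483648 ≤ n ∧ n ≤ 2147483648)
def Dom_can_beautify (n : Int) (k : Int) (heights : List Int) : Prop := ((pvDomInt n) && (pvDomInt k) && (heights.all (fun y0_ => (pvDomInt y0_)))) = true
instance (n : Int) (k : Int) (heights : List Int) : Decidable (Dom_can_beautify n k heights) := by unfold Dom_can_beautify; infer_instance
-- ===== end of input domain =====

-- B computes the set of violating positions once and evaluates each candidate swap
-- incrementally — coverage of the bad set plus a local window recheck on a virtual
-- swapped view — instead of A's full re-scan of the array after every swap
-- (objective: alternative). Equivalence is about the RETURN value only: Python A leaves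
-- `heights` swapped in place when it answers "YES" via a swap; B never mutates it.

-- ===== PORT A =====
-- Python's `start` read inside is_beautiful is the global 0 (the write to start_point
-- there is a dead local), and `start = start_point` in can_beautify is the global 0:
-- both loops start at 0.
def isBeautifulA (heights : List Int) (k : Int) : Bool :=
  -- for i in range(0, n-1): valid = inner scan with break; if not valid: return False
  (PySem.List.pyRange 0 ((heights.length : Int) - 1) 1).all (fun i =>
    (PySem.List.pyRange (i + 1) (min (i + k + 1) (heights.length : Int)) 1).any (fun j =>
      PySem.List.pyGetD heights j 0 < PySem.List.pyGetD heights i 0))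

def can_beautify (n : Int) (k : Int) (heights : List Int) : String :=
  if isBeautifulA heights k then "YES"
  else
    -- for i in range(0, n-1): for j in range(i+1, n): swap, test, swap back
    if (PySem.List.pyRange 0 (n - 1) 1).any (fun i =>
        (PySem.List.pyRange (i + 1) n 1).any (fun j =>
          if PySem.List.pyGetD heights i 0 > PySem.List.pyGetD heights j 0 then
            isBeautifulA
              ((heights.set i.toNat (PySem.List.pyGetD heights j 0)).set j.toNat
                (PySem.List.pyGetD heights i 0)) k
          else false))
    then "YES" else "NO"

-- ===== PORT B =====
-- good(p, val): some position in the window p+1 .. p+kk (clipped to the list) is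
-- strictly smaller than position p, all values read through the valuation `val`
def goodAtB (m kk : Int) (val : Int → Int) (p : Int) : Bool :=
  (PySem.List.pyRange (p + 1) (min (p + 1 + kk) m) 1).any (fun q => decide (val q < val p))

-- lambda x: h[x]
def identV (h : List Int) : Int → Int := fun x => PySem.List.pyGetD h x 0

-- virtual swapped view: h[j] if x == i else h[i] if x == j else h[x]
def swapV (h : List Int) (i j : Int) : Int → Int := fun x =>
  if x = i then PySem.List.pyGetD h j 0
  else if x = j then PySem.List.pyGetD h i 0
  else PySem.List.pyGetD h x 0

-- bad = [p for p in range(m-1) if not good(p, ident)]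
def badListB (h : List Int) (kk : Int) : List Int :=
  (PySem.List.pyRange 0 ((h.length : Int) - 1) 1).filter
    (fun p => !goodAtB (h.length : Int) kk (identV h) p)

-- changed = list(range(max(0,i-kk), i+1)) + list(range(max(0,j-kk), j+1))
def changedB (kk i j : Int) : List Int :=
  PySem.List.pyRange (max 0 (i - kk)) (i + 1) 1 ++ PySem.List.pyRange (max 0 (j - kk)) (j + 1) 1

def can_beautify_alt (n : Int) (k : Int) (heights : List Int) : String :=
  let kk : Int := if 0 < k then k else 0
  if (badListB heights kk).isEmpty then "YES"
  else
    if (PySem.List.pyRange 0 (n - 1) 1).any (fun i =>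
        (PySem.List.pyRange (i + 1) n 1).any (fun j =>
          decide (PySem.List.pyGetD heights j 0 < PySem.List.pyGetD heights i 0) &&
          ((badListB heights kk).all (fun b => (changedB kk i j).contains b) &&
           ((changedB kk i j).filter (fun p => decide (p < (heights.length : Int) - 1))).all
             (goodAtB (heights.length : Int) kk (swapV heights i j)))))
    then "YES" else "NO"

-- ===== PRECONDITION & SPEC =====
-- Pre_ excludes exactly the corner n > len(heights) with the list not already
-- beautiful: there the swap loop indexes heights past its end and both programs
-- raise IndexError; the already-beautiful case (second disjunct) never reaches
-- the swap loop and is kept.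
def Pre_can_beautify (n : Int) (k : Int) (heights : List Int) : Prop :=
  n ≤ (heights.length : Int) ∨
    ∀ i ∈ PySem.List.pyRange 0 ((heights.length : Int) - 1) 1,
      ∃ j ∈ PySem.List.pyRange (i + 1) (min (i + k + 1) (heights.length : Int)) 1,
        PySem.List.pyGetD heights j 0 < PySem.List.pyGetD heights i 0
instance (n : Int) (k : Int) (heights : List Int) : Decidable (Pre_can_beautify n k heights) := by
  unfold Pre_can_beautify; infer_instance

def pvWitness_can_beautify : Int × Int × List Int := (3, 1, [3, 1, 2])

def Spec_can_beautify (n : Int) (k : Int) (heights : List Int) (out : String) : Prop := out = can_beautify_alt n k heights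
instance (n : Int) (k : Int) (heights : List Int) (out : String) : Decidable (Spec_can_beautify n k heights out) := by unfold Spec_can_beautify; infer_instance

-- ===== CLAIM (what is proved, stated in full; the proofs are below) =====
def Claim_equal_can_beautify : Prop := ∀ (n : Int) (k : Int) (heights : List Int), Dom_can_beautify n k heights → Pre_can_beautify n k heights → Spec_can_beautify n k heights (can_beautify n k heights)

-- ===== LEMMAS AND PROOFS =====

-- A's window scan at position i on a list g equals B's good test with the identity view
theorem windowA_eq (g : List Int) (k i : Int) :
    ((PySem.List.pyRange (i + 1) (min (i + k + 1) (g.length : Int)) 1).any (fun j =>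
      PySem.List.pyGetD g j 0 < PySem.List.pyGetD g i 0))
    = goodAtB (g.length : Int) (if 0 < k then k else 0) (identV g) i := by
  unfold goodAtB identV
  by_cases hk : 0 < k
  · rw [if_pos hk]
    have h1 : i + k + 1 = i + 1 + k := by ring
    rw [h1]
  · rw [if_neg hk]
    rw [PySem.List.pyRange_one_eq_nil (a := i + 1) (by omega : min (i + k + 1) (g.length : Int) ≤ i + 1),
        PySem.List.pyRange_one_eq_nil (a := i + 1) (by omega : min (i + 1 + 0) (g.length : Int) ≤ i + 1)]

-- A's beauty test as a ∀ over positions, phrased with B's good test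
theorem isBeautifulA_iff (g : List Int) (k : Int) :
    isBeautifulA g k = true ↔
      ∀ p : Int, 0 ≤ p → p < (g.length : Int) - 1 →
        goodAtB (g.length : Int) (if 0 < k then k else 0) (identV g) p = true := by
  unfold isBeautifulA
  rw [List.all_eq_true]
  constructor
  · intro h p hp0 hpm
    have := h p (PySem.List.mem_pyRange_one.mpr ⟨hp0, by omega⟩)
    rwa [windowA_eq] at this
  · intro h p hp
    have hm := PySem.List.mem_pyRange_one.mp hp
    rw [windowA_eq]
    exact h p hm.1 (by omega)

-- good depends only on the valuation's values at indices 0 ≤ x < m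
theorem goodAtB_congr (m kk : Int) (f f' : Int → Int) (p : Int)
    (hagree : ∀ x : Int, 0 ≤ x → x < m → f x = f' x) (hp0 : 0 ≤ p) (hpm : p < m) :
    goodAtB m kk f p = goodAtB m kk f' p := by
  unfold goodAtB
  refine PySem.List.any_congr_mem (fun q hq => ?_)
  have hqm := PySem.List.mem_pyRange_one.mp hq
  rw [hagree q (by omega) (by omega), hagree p hp0 hpm]

-- the swapped list's values are the virtual swapped view
theorem swap_view (h : List Int) (i j : Int) (hi0 : 0 ≤ i) (hij : i < j)
    (_hjm : j < (h.length : Int)) (q : Int) (hq0 : 0 ≤ q) (hqm : q < (h.length : Int)) :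
    PySem.List.pyGetD
      ((h.set i.toNat (PySem.List.pyGetD h j 0)).set j.toNat (PySem.List.pyGetD h i 0)) q 0
    = swapV h i j q := by
  have hlen : ((h.set i.toNat (PySem.List.pyGetD h j 0)).set j.toNat (PySem.List.pyGetD h i 0)).length = h.length := by simp
  rw [PySem.List.pyGetD_eq_getElem _ 0 hq0 (by rw [hlen]; omega), swapV]
  simp only [List.getElem_set]
  split_ifs <;>
    first
      | rfl
      | exact (PySem.List.pyGetD_eq_getElem h 0 hq0 (by omega)).symm
      | (exfalso; omega)

-- the swapped view agrees with the identity view away from i and j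
theorem swapV_eq_identV (h : List Int) (i j x : Int) (hxi : x ≠ i) (hxj : x ≠ j) :
    swapV h i j x = identV h x := by
  unfold swapV identV
  rw [if_neg hxi, if_neg hxj]

-- membership in the `changed` list for nonnegative p
theorem mem_changedB (kk i j p : Int) (hp0 : 0 ≤ p) :
    p ∈ changedB kk i j ↔ ((i - kk ≤ p ∧ p ≤ i) ∨ (j - kk ≤ p ∧ p ≤ j)) := by
  unfold changedB
  rw [List.mem_append, PySem.List.mem_pyRange_one, PySem.List.mem_pyRange_one]
  omega

-- locality: a swap at (i, j) does not change goodness outside `changed`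
theorem locality (h : List Int) (kk i j p : Int) (hkk : 0 ≤ kk) (hij : i < j)
    (_hp0 : 0 ≤ p)
    (hout : ¬ ((i - kk ≤ p ∧ p ≤ i) ∨ (j - kk ≤ p ∧ p ≤ j))) (m : Int) :
    goodAtB m kk (swapV h i j) p = goodAtB m kk (identV h) p := by
  unfold goodAtB
  have hvp : swapV h i j p = identV h p := swapV_eq_identV h i j p (by omega) (by omega)
  refine PySem.List.any_congr_mem (fun q hq => ?_)
  have hqm := PySem.List.mem_pyRange_one.mp hq
  have hq1 : p + 1 ≤ q := hqm.1
  have hq2 : q < min (p + 1 + kk) m := hqm.2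
  have hvq : swapV h i j q = identV h q := swapV_eq_identV h i j q (by omega) (by omega)
  rw [hvp, hvq]

-- per-pair equivalence: A's full re-check of the swapped list equals B's incremental test
theorem pairEq (h : List Int) (k i j : Int) (hi0 : 0 ≤ i) (hij : i < j)
    (hjm : j < (h.length : Int)) :
    isBeautifulA
      ((h.set i.toNat (PySem.List.pyGetD h j 0)).set j.toNat (PySem.List.pyGetD h i 0)) k
    = ((badListB h (if 0 < k then k else 0)).all
        (fun b => (changedB (if 0 < k then k else 0) i j).contains b) &&
       ((changedB (if 0 < k then k else 0) i j).filter
          (fun p => decide (p < (h.length : Int) - 1))).all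
         (goodAtB (h.length : Int) (if 0 < k then k else 0) (swapV h i j))) := by
  set kk := if 0 < k then k else 0 with hkkdef
  have hkk : 0 ≤ kk := by rw [hkkdef]; split <;> omega
  set g := (h.set i.toNat (PySem.List.pyGetD h j 0)).set j.toNat (PySem.List.pyGetD h i 0) with hgdef
  have hglen : (g.length : Int) = (h.length : Int) := by simp [hgdef]
  have hLHS : isBeautifulA g k = true ↔
      ∀ p : Int, 0 ≤ p → p < (h.length : Int) - 1 →
        goodAtB (h.length : Int) kk (swapV h i j) p = true := by
    rw [isBeautifulA_iff, hglen]
    constructor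
    · intro hh p hp0 hpm
      have := hh p hp0 hpm
      rwa [goodAtB_congr _ kk (identV g) (swapV h i j) p
        (fun x hx0 hxm => by
          simp only [identV]
          exact swap_view h i j hi0 hij hjm x hx0 (by omega)) hp0 (by omega)] at this
    · intro hh p hp0 hpm
      have := hh p hp0 hpm
      rwa [goodAtB_congr _ kk (identV g) (swapV h i j) p
        (fun x hx0 hxm => by
          simp only [identV]
          exact swap_view h i j hi0 hij hjm x hx0 (by omega)) hp0 (by omega)]
  rw [Bool.eq_iff_iff, hLHS, Bool.and_eq_true, List.all_eq_true, List.all_eq_true]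
  constructor
  · intro hall
    constructor
    · intro b hb
      have hbf := List.mem_filter.mp hb
      have hbr := PySem.List.mem_pyRange_one.mp hbf.1
      have hbad : goodAtB (h.length : Int) kk (identV h) b = false := by
        have := hbf.2; simpa using this
      rw [List.contains_eq_mem, decide_eq_true_iff, mem_changedB kk i j b hbr.1]
      by_contra hout
      have := locality h kk i j b hkk hij hbr.1 hout (h.length : Int)
      have hgood := hall b hbr.1 (by omega)
      rw [this, hbad] at hgood
      exact Bool.false_ne_true hgood
    · intro p hp
      have hpf := List.mem_filter.mp hp
      have hp0 : 0 ≤ p := by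
        unfold changedB at hpf
        rcases List.mem_append.mp hpf.1 with hmem | hmem <;>
          · have := PySem.List.mem_pyRange_one.mp hmem; omega
      have hpm : p < (h.length : Int) - 1 := by
        have := hpf.2; simpa using this
      exact hall p hp0 hpm
  · rintro ⟨hcov, hre⟩ p hp0 hpm
    by_cases hin : (i - kk ≤ p ∧ p ≤ i) ∨ (j - kk ≤ p ∧ p ≤ j)
    · refine hre p (List.mem_filter.mpr ⟨(mem_changedB kk i j p hp0).mpr hin, by simpa using hpm⟩)
    · rw [locality h kk i j p hkk hij hp0 hin (h.length : Int)]
      by_cases hgood : goodAtB (h.length : Int) kk (identV h) p = true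
      · exact hgood
      · exfalso
        have hb : p ∈ badListB h kk := by
          unfold badListB
          refine List.mem_filter.mpr ⟨PySem.List.mem_pyRange_one.mpr ⟨hp0, by omega⟩, ?_⟩
          simp only [Bool.not_eq_true'] at *
          simpa using (Bool.not_eq_true _).mp hgood
        have := hcov p hb
        rw [List.contains_eq_mem, decide_eq_true_iff, mem_changedB kk i j p hp0] at this
        exact hin this

-- A's beauty test equals "B's bad list is empty"
theorem beaut_iff_badEmpty (h : List Int) (k : Int) :
    isBeautifulA h k = (badListB h (if 0 < k then k else 0)).isEmpty := by
  rw [Bool.eq_iff_iff, isBeautifulA_iff, List.isEmpty_iff, badListB, List.filter_eq_nil_iff]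
  constructor
  · intro hall p hp
    have hm := PySem.List.mem_pyRange_one.mp hp
    simp [hall p hm.1 (by omega)]
  · intro hnone p hp0 hpm
    have := hnone p (PySem.List.mem_pyRange_one.mpr ⟨hp0, by omega⟩)
    simpa using this

-- ===== VERDICT (by name: the statement is the Claim_ definition above) =====
theorem can_beautify_spec : Claim_equal_can_beautify := by
  intro n k heights _dom pre
  unfold Spec_can_beautify can_beautify can_beautify_alt
  simp only []
  rw [beaut_iff_badEmpty heights k]
  by_cases hb : (badListB heights (if 0 < k then k else 0)).isEmpty = true
  · rw [if_pos hb, if_pos hb]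
  · rw [if_neg hb, if_neg hb]
    have hnm : n ≤ (heights.length : Int) := by
      rcases pre with hle | hbe
      · exact hle
      · exfalso
        apply hb
        rw [← beaut_iff_badEmpty heights k]
        unfold isBeautifulA
        rw [List.all_eq_true]
        intro i hi
        rcases hbe i hi with ⟨j, hj, hlt⟩
        rw [List.any_eq_true]
        exact ⟨j, hj, by simpa using hlt⟩
    have hmain : (PySem.List.pyRange 0 (n - 1) 1).any (fun i =>
        (PySem.List.pyRange (i + 1) n 1).any (fun j =>
          if PySem.List.pyGetD heights i 0 > PySem.List.pyGetD heights j 0 then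
            isBeautifulA
              ((heights.set i.toNat (PySem.List.pyGetD heights j 0)).set j.toNat
                (PySem.List.pyGetD heights i 0)) k
          else false))
      = (PySem.List.pyRange 0 (n - 1) 1).any (fun i =>
        (PySem.List.pyRange (i + 1) n 1).any (fun j =>
          decide (PySem.List.pyGetD heights j 0 < PySem.List.pyGetD heights i 0) &&
          ((badListB heights (if 0 < k then k else 0)).all
            (fun b => (changedB (if 0 < k then k else 0) i j).contains b) &&
           ((changedB (if 0 < k then k else 0) i j).filter
              (fun p => decide (p < (heights.length : Int) - 1))).all
             (goodAtB (heights.length : Int) (if 0 < k then k else 0)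
               (swapV heights i j))))) := by
      refine PySem.List.any_congr_mem (fun i hi => ?_)
      have hir := PySem.List.mem_pyRange_one.mp hi
      refine PySem.List.any_congr_mem (fun j hj => ?_)
      have hjr := PySem.List.mem_pyRange_one.mp hj
      by_cases hlt : PySem.List.pyGetD heights j 0 < PySem.List.pyGetD heights i 0
      · rw [if_pos (by exact hlt), decide_eq_true hlt, Bool.true_and]
        exact pairEq heights k i j hir.1 (by omega) (by omega)
      · rw [if_neg (by exact hlt), decide_eq_false hlt, Bool.false_and]
    rw [hmain]
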